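-- pv_equiv track=rewrite | github.com/emreisler/4DigitPredictingGame | AiPlayer.py | giveHint
-- ===== SOURCE A (Python) =====
-- def giveHint(prediction,target):
--     pointsA = 0
--     pointsB = 0
--     for i in range(4):
--         if prediction[i] in target:
--             if prediction[i] == target[i]:
--                 pointsA += 1
--             else:
--                 pointsB += 1
--
--     return pointsA,pointsB
-- ===== SOURCE B (Python) =====
-- def giveHint(prediction, target):
--     def go(ps, ts, a, b):
--         if not ps or not ts:
--             return a, b
--         if ps[0] in target:
--             if ps[0] == ts[0]:
--                 return go(ps[1:], ts[1:], a + 1, b)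
--             return go(ps[1:], ts[1:], a, b + 1)
--         return go(ps[1:], ts[1:], a, b)
--     return go([prediction[i] for i in range(4)], target[:4], 0, 0)
-- ===== Notes on version B (the rewrite author's own statement) =====
-- stated objective: alternative
-- what changed: A's index loop over range(4) with two mutable counters is replaced by a recursive function that first materializes the four guessed digits and the first four target digits, then walks the two lists structurally in lockstep, threading both counters as accumulator arguments.
import Mathlib
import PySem

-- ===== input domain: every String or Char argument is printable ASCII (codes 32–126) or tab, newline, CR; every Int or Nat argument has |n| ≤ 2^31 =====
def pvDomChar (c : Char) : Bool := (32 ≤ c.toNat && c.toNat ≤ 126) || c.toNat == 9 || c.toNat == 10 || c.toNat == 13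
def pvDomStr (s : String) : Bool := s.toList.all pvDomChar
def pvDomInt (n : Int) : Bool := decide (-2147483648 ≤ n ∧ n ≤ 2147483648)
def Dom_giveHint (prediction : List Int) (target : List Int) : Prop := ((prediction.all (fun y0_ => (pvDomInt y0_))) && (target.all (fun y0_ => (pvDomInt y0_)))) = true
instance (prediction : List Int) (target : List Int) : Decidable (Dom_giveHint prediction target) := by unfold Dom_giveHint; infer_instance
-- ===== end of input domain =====

-- B replaces A's range(4) index loop by a recursion that walks the first four guessed
-- digits and target[:4] structurally in lockstep, carrying the two counters as
-- accumulators (objective: alternative decomposition, same cost).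

-- ===== PORT A =====
def giveHint (prediction : List Int) (target : List Int) : Int × Int :=
  let r := (PySem.List.pyRange 0 4 1).foldl
    (fun (pts : Int × Int) i =>
      if PySem.List.pyGetD prediction i 0 ∈ target then
        if PySem.List.pyGetD prediction i 0 = PySem.List.pyGetD target i 0 then
          (pts.1 + 1, pts.2)
        else
          (pts.1, pts.2 + 1)
      else pts) ((0 : Int), (0 : Int))
  (r.1, r.2)

-- ===== PORT B =====
-- the inner recursive helper 'go' of Source B (membership tested against the full target)
def goHint (target : List Int) : List Int → List Int → Int → Int → Int × Int
  | [], _, a, b => (a, b)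
  | _ :: _, [], a, b => (a, b)
  | p :: ps, t :: ts, a, b =>
    if p ∈ target then
      if p = t then goHint target ps ts (a + 1) b
      else goHint target ps ts a (b + 1)
    else goHint target ps ts a b

def giveHint_alt (prediction : List Int) (target : List Int) : Int × Int :=
  goHint target ((PySem.List.pyRange 0 4 1).map (fun i => PySem.List.pyGetD prediction i 0))
    (PySem.List.slice target none (some 4)) 0 0

-- ===== PRECONDITION & SPEC =====
-- Pre_ excludes exactly the inputs on which A raises IndexError: predictions shorter
-- than 4, and the conditional access target[i] at an index i ≥ len(target) whose digit
-- is in target.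
def Pre_giveHint (prediction : List Int) (target : List Int) : Prop :=
  4 ≤ prediction.length ∧
    ∀ i ∈ List.range 4, prediction.getD i 0 ∈ target → i < target.length
instance (prediction : List Int) (target : List Int) : Decidable (Pre_giveHint prediction target) := by unfold Pre_giveHint; infer_instance

def pvWitness_giveHint : List Int × List Int := ([1, 2, 3, 4], [4, 3, 2, 1])

def Spec_giveHint (prediction : List Int) (target : List Int) (out : Int × Int) : Prop := out = giveHint_alt prediction target
instance (prediction : List Int) (target : List Int) (out : Int × Int) : Decidable (Spec_giveHint prediction target out) := by unfold Spec_giveHint; infer_instance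

-- ===== CLAIM =====
def Claim_equal_giveHint : Prop := ∀ (prediction : List Int) (target : List Int), Dom_giveHint prediction target → Pre_giveHint prediction target → Spec_giveHint prediction target (giveHint prediction target)

-- ===== LEMMAS AND PROOFS =====

def stepHint (target : List Int) (s : Int × Int) (pt : Int × Int) : Int × Int :=
  if pt.1 ∈ target then
    if pt.1 = pt.2 then (s.1 + 1, s.2) else (s.1, s.2 + 1)
  else s

theorem goHint_eq_foldl (target : List Int) (ps ts : List Int) (a b : Int) :
    goHint target ps ts a b = (ps.zip ts).foldl (stepHint target) (a, b) := by
  induction ps generalizing ts a b with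
  | nil => simp [goHint]
  | cons p ps ih =>
      cases ts with
      | nil => simp [goHint]
      | cons t ts =>
          simp only [goHint, List.zip_cons_cons, List.foldl_cons, stepHint]
          split_ifs <;> rw [ih]

theorem pg0 (x0 : Int) (l : List Int) : PySem.List.pyGetD (x0 :: l) 0 0 = x0 := by
  have h : ((0 : Int)) = ((0 : Nat) : Int) := by norm_num
  rw [h, PySem.List.pyGetD_natCast]; rfl

theorem pg1 (x0 x1 : Int) (l : List Int) :
    PySem.List.pyGetD (x0 :: x1 :: l) 1 0 = x1 := by
  have h : ((1 : Int)) = ((1 : Nat) : Int) := by norm_num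
  rw [h, PySem.List.pyGetD_natCast]; rfl

theorem pg2 (x0 x1 x2 : Int) (l : List Int) :
    PySem.List.pyGetD (x0 :: x1 :: x2 :: l) 2 0 = x2 := by
  have h : ((2 : Int)) = ((2 : Nat) : Int) := by norm_num
  rw [h, PySem.List.pyGetD_natCast]; rfl

theorem pg3 (x0 x1 x2 x3 : Int) (l : List Int) :
    PySem.List.pyGetD (x0 :: x1 :: x2 :: x3 :: l) 3 0 = x3 := by
  have h : ((3 : Int)) = ((3 : Nat) : Int) := by norm_num
  rw [h, PySem.List.pyGetD_natCast]; rfl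

theorem slice_none4 (xs : List Int) :
    PySem.List.slice xs none (some 4) = xs.take 4 := by
  have h : ((4 : Int)) = ((4 : Nat) : Int) := by norm_num
  rw [h, PySem.List.slice_to_natCast]

theorem take4_cons (x0 x1 x2 x3 : Int) (l : List Int) :
    (x0 :: x1 :: x2 :: x3 :: l).take 4 = [x0, x1, x2, x3] := rfl

theorem giveHint_eq_alt (prediction target : List Int)
    (hp : 4 ≤ prediction.length)
    (ht : ∀ i ∈ List.range 4, prediction.getD i 0 ∈ target → i < target.length) :
    giveHint prediction target = giveHint_alt prediction target := by
  obtain ⟨p0, p1, p2, p3, ps, rfl⟩ :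
      ∃ p0 p1 p2 p3 ps, prediction = p0 :: p1 :: p2 :: p3 :: ps := by
    match prediction, hp with
    | p0 :: p1 :: p2 :: p3 :: ps, _ => exact ⟨p0, p1, p2, p3, ps, rfl⟩
  have hr : PySem.List.pyRange 0 4 1 = [0, 1, 2, 3] := by decide
  unfold giveHint giveHint_alt
  rw [goHint_eq_foldl, slice_none4]
  simp only [hr, List.map_cons, List.map_nil, List.foldl_cons, List.foldl_nil,
    pg0, pg1, pg2, pg3]
  match target with
  | [] =>
      simp
  | [t0] =>
      have h1 := ht 1 (by decide)
      have h2 := ht 2 (by decide)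
      have h3 := ht 3 (by decide)
      simp only [List.getD, List.getElem?_cons_succ, List.getElem?_cons_zero,
        Option.getD_some, List.length_singleton] at h1 h2 h3
      have n1 : p1 ∉ ([t0] : List Int) := fun h => absurd (h1 h) (by omega)
      have n2 : p2 ∉ ([t0] : List Int) := fun h => absurd (h2 h) (by omega)
      have n3 : p3 ∉ ([t0] : List Int) := fun h => absurd (h3 h) (by omega)
      rw [List.take_of_length_le (by simp)]
      simp only [List.zip_cons_cons, List.zip_nil_right, List.foldl_cons,
        List.foldl_nil, stepHint, pg0, n1, n2, n3, if_false]
  | [t0, t1] =>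
      have h2 := ht 2 (by decide)
      have h3 := ht 3 (by decide)
      simp only [List.getD, List.getElem?_cons_succ, List.getElem?_cons_zero,
        Option.getD_some, List.length_cons, List.length_nil] at h2 h3
      have n2 : p2 ∉ ([t0, t1] : List Int) := fun h => absurd (h2 h) (by omega)
      have n3 : p3 ∉ ([t0, t1] : List Int) := fun h => absurd (h3 h) (by omega)
      rw [List.take_of_length_le (by simp)]
      simp only [List.zip_cons_cons, List.zip_nil_right, List.foldl_cons,
        List.foldl_nil, stepHint, pg0, pg1, n2, n3, if_false]
  | [t0, t1, t2] =>
      have h3 := ht 3 (by decide)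
      simp only [List.getD, List.getElem?_cons_succ, List.getElem?_cons_zero,
        Option.getD_some, List.length_cons, List.length_nil] at h3
      have n3 : p3 ∉ ([t0, t1, t2] : List Int) := fun h => absurd (h3 h) (by omega)
      rw [List.take_of_length_le (by simp)]
      simp only [List.zip_cons_cons, List.zip_nil_right, List.foldl_cons,
        List.foldl_nil, stepHint, pg0, pg1, pg2, n3, if_false]
  | t0 :: t1 :: t2 :: t3 :: ts =>
      rw [take4_cons]
      simp only [List.zip_cons_cons, List.zip_nil_right,
        List.foldl_cons, List.foldl_nil, stepHint, pg0, pg1, pg2, pg3]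

-- ===== VERDICT =====
theorem giveHint_spec : Claim_equal_giveHint := by
  intro prediction target _ hpre
  unfold Spec_giveHint
  exact giveHint_eq_alt prediction target hpre.1 hpre.2
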